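-- pv_equiv track=rewrite | github.com/Ezdies/CodeWars | python/Kata6/cutTheRopes.py | cut_the_ropes
-- ===== SOURCE A (Python) =====
-- def cut_the_ropes(arr):
--     counter_arr = []
--     while any(number > 0 for number in arr):
--         mini = min(num for num in arr if num > 0)
--         non_zero_count = sum(True for num in arr if num > 0 and num >= mini)
--         arr = [num - mini for num in arr if num > 0]
--         counter_arr.append(non_zero_count)
--     return counter_arr
-- ===== SOURCE B (Python) =====
-- def cut_the_ropes(arr):
--     pos = sorted(x for x in arr if x > 0)
--     res = []
--     remaining = len(pos)
--     prev = None
--     for v in pos: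
--         if v != prev:
--             res.append(remaining)
--             prev = v
--         remaining -= 1
--     return res
-- ===== Notes on version B (the rewrite author's own statement) =====
-- stated objective: faster
-- what changed: Replaced the repeated subtract-the-minimum-and-rescan loop (quadratic) by one ascending sort of the positive ropes followed by a single scan that emits the remaining count at each new distinct length.
import Mathlib
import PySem

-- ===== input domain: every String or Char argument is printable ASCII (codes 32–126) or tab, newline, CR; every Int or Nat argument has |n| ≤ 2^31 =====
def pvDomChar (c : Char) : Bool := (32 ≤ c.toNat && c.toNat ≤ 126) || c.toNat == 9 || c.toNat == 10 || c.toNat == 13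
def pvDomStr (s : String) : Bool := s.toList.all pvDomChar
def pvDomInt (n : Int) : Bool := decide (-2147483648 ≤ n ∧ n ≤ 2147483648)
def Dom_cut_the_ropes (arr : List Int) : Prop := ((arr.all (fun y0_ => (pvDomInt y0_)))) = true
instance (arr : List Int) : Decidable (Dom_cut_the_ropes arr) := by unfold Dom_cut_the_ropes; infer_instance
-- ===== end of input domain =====

-- B replaces A's quadratic repeated min-subtraction loop by one sort of the positive ropes
-- plus a single scan emitting the remaining count at each new distinct value (faster).

-- ===== PORT A =====
-- termination of the while loop: the number of positive ropes strictly decreases each pass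
-- (the minimal positive rope becomes 0); the port cites this lemma in decreasing_by.
-- arr = [num - mini for num in arr if num > 0]  (the next loop state), as a named helper
def pvNext (arr : List Int) (m : Int) : List Int :=
  (arr.filter (fun n => decide (0 < n))).map (fun n => n - m)

theorem pv_cut_term (arr : List Int) (m : Int)
    (hm : PySem.List.min? (arr.filter (fun n => decide (0 < n))) (fun x => x) = some m) :
    ((pvNext arr m).filter (fun n => decide (0 < n))).length
      < (arr.filter (fun n => decide (0 < n))).length := by
  have hmem := PySem.List.min?_mem hm
  rw [pvNext, List.filter_map, List.length_map]
  exact List.length_filter_lt_length_iff_exists.mpr ⟨m, hmem, by simp⟩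

-- while any(number > 0 for number in arr): … — structural well-founded recursion on the
-- count of positive elements; each iteration transliterated line for line.
def cut_the_ropes (arr : List Int) : List Int :=
  if _h : arr.any (fun n => decide (0 < n)) then
    match hm : PySem.List.min? (arr.filter (fun n => decide (0 < n))) (fun x => x) with
    | some m =>
      -- non_zero_count = sum(True for num in arr if num > 0 and num >= mini)
      (((arr.filter (fun n => decide (0 < n) && decide (m ≤ n))).length : Int))
        -- append non_zero_count, then loop on the next state
        :: cut_the_ropes (pvNext arr m)
    | none => []  -- unreachable: some rope is positive, so the filtered list is nonempty
  else []
termination_by (arr.filter (fun n => decide (0 < n))).length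
decreasing_by exact pv_cut_term arr m hm

-- ===== PORT B =====
def cut_the_ropes_alt (arr : List Int) : List Int :=
  -- pos = sorted(x for x in arr if x > 0)
  let pos := PySem.List.sorted (arr.filter (fun n => decide (0 < n))) (fun x => x) false
  -- res = []; remaining = len(pos); prev = None; for v in pos: …
  (pos.foldl
    (fun (st : List Int × Int × Option Int) v =>
      if some v ≠ st.2.2 then (st.1 ++ [st.2.1], st.2.1 - 1, some v)
      else (st.1, st.2.1 - 1, st.2.2))
    ([], (pos.length : Int), none)).1

-- ===== PRECONDITION & SPEC =====
def Spec_cut_the_ropes (arr : List Int) (out : List Int) : Prop := out = cut_the_ropes_alt arr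
instance (arr : List Int) (out : List Int) : Decidable (Spec_cut_the_ropes arr out) := by unfold Spec_cut_the_ropes; infer_instance

-- ===== CLAIM (what is proved, stated in full; the proofs are below) =====
def Claim_equal_cut_the_ropes : Prop := ∀ (arr : List Int), Dom_cut_the_ropes arr → Spec_cut_the_ropes arr (cut_the_ropes arr)

-- ===== LEMMAS AND PROOFS =====

-- the value B's scan produces, as a recursion: emit the remaining count at each value ≠ prev
def pvEmit : Option Int → List Int → List Int
  | _, [] => []
  | prev, y :: ys =>
      if some y ≠ prev then ((ys.length : Int) + 1) :: pvEmit (some y) ys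
      else pvEmit prev ys

theorem pvEmit_foldl (L : List Int) (res : List Int) (prev : Option Int) :
    (L.foldl
      (fun (st : List Int × Int × Option Int) v =>
        if some v ≠ st.2.2 then (st.1 ++ [st.2.1], st.2.1 - 1, some v)
        else (st.1, st.2.1 - 1, st.2.2))
      (res, (L.length : Int), prev)).1 = res ++ pvEmit prev L := by
  induction L generalizing res prev with
  | nil => simp [pvEmit]
  | cons y ys ih =>
      simp only [List.foldl_cons, pvEmit]
      by_cases h : some y ≠ prev
      · rw [if_pos h, if_pos h]
        have : ((y :: ys).length : Int) - 1 = (ys.length : Int) := by simp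
        rw [this, ih]
        simp [List.append_assoc]
      · rw [if_neg h, if_neg h]
        have : ((y :: ys).length : Int) - 1 = (ys.length : Int) := by simp
        rw [this, ih]

theorem alt_eq_emit (arr : List Int) :
    cut_the_ropes_alt arr
      = pvEmit none (PySem.List.sorted (arr.filter (fun n => decide (0 < n))) (fun x => x) false) := by
  unfold cut_the_ropes_alt
  exact (pvEmit_foldl _ [] none).trans (by simp)

-- subtracting a constant does not change the emitted counts
theorem pvEmit_shift (L : List Int) (c : Int) (prev : Option Int) :
    pvEmit (prev.map (fun x => x - c)) (L.map (fun x => x - c)) = pvEmit prev L := by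
  induction L generalizing prev with
  | nil => simp [pvEmit]
  | cons y ys ih =>
      simp only [List.map_cons, pvEmit, List.length_map]
      have hiff : (some (y - c) ≠ prev.map (fun x => x - c)) ↔ (some y ≠ prev) := by
        cases prev with
        | none => simp
        | some p =>
          simp only [Option.map_some, ne_eq, Option.some.injEq]
          constructor <;> (intro h he; exact h (by omega))
      by_cases h : some y ≠ prev
      · rw [if_pos (hiff.mpr h), if_pos h]
        have := ih (prev := some y)
        simpa using congrArg (List.cons ((ys.length : Int) + 1)) this
      · rw [if_neg (fun hc => h (hiff.mp hc)), if_neg h]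
        exact ih prev

theorem pvEmit_shift_none (L : List Int) (c : Int) :
    pvEmit none (L.map (fun x => x - c)) = pvEmit none L := by
  simpa using pvEmit_shift L c none

-- a previous value strictly below everything behaves like no previous value
theorem pvEmit_fresh (L : List Int) (m : Int) (h : ∀ x ∈ L, m < x) :
    pvEmit (some m) L = pvEmit none L := by
  cases L with
  | nil => rfl
  | cons y ys =>
      have hy : m < y := h y (by simp)
      simp only [pvEmit]
      rw [if_pos (by simp; omega), if_pos (by simp)]

-- on an ascending list bounded below by m, leading copies of m are skipped by the scan
theorem pvEmit_skip (L : List Int) (m : Int) (hs : L.Pairwise (· ≤ ·))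
    (hb : ∀ x ∈ L, m ≤ x) :
    pvEmit (some m) L = pvEmit (some m) (L.filter (fun x => decide (m < x))) := by
  induction L with
  | nil => rfl
  | cons y ys ih =>
      have hy : m ≤ y := hb y (by simp)
      have hys : ∀ x ∈ ys, y ≤ x := fun x hx => (List.pairwise_cons.mp hs).1 x hx
      by_cases hym : y = m
      · subst hym
        have : (y :: ys).filter (fun x => decide (y < x)) = ys.filter (fun x => decide (y < x)) := by
          simp
        rw [this, ← ih (List.pairwise_cons.mp hs).2 (fun x hx => hys x hx)]
        simp [pvEmit]
      · have hlt : m < y := lt_of_le_of_ne hy (fun he => hym he.symm)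
        have : (y :: ys).filter (fun x => decide (m < x)) = y :: ys := by
          rw [List.filter_eq_self]
          intro x hx
          simp only [List.mem_cons] at hx
          rcases hx with rfl | hx
          · simp [hlt]
          · have := hys x hx; simp; omega
        rw [this]

-- one pass of A's loop, seen on the sorted positive list
theorem pvEmit_step (S : List Int) (m : Int) (hS : S.Pairwise (· ≤ ·))
    (hmem : m ∈ S) (hmin : ∀ y ∈ S, m ≤ y) :
    pvEmit none S
      = ((S.length : Int)) :: pvEmit none ((S.filter (fun x => decide (m < x))).map (fun x => x - m)) := by
  cases S with
  | nil => simp at hmem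
  | cons s rest =>
      have hrest : rest.Pairwise (· ≤ ·) := (List.pairwise_cons.mp hS).2
      have hsle : ∀ x ∈ rest, s ≤ x := (List.pairwise_cons.mp hS).1
      have hsm : s = m := by
        have h1 : m ≤ s := hmin s (by simp)
        have h2 : s ≤ m := by
          rcases List.mem_cons.mp hmem with rfl | hm
          · exact le_refl _
          · exact hsle m hm
        omega
      subst hsm
      have hfilter : (s :: rest).filter (fun x => decide (s < x))
          = rest.filter (fun x => decide (s < x)) := by simp
      have hb : ∀ x ∈ rest, s ≤ x := hsle
      have hgt : ∀ x ∈ rest.filter (fun x => decide (s < x)), s < x := by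
        intro x hx
        have := List.of_mem_filter hx
        simpa using this
      calc pvEmit none (s :: rest)
          = ((rest.length : Int) + 1) :: pvEmit (some s) rest := by
            simp [pvEmit]
        _ = ((rest.length : Int) + 1) :: pvEmit (some s) (rest.filter (fun x => decide (s < x))) := by
            rw [pvEmit_skip rest s hrest hb]
        _ = ((rest.length : Int) + 1) :: pvEmit none (rest.filter (fun x => decide (s < x))) := by
            rw [pvEmit_fresh _ s hgt]
        _ = ((rest.length : Int) + 1)
              :: pvEmit none ((rest.filter (fun x => decide (s < x))).map (fun x => x - s)) := by
            rw [pvEmit_shift_none]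
        _ = _ := by rw [hfilter]; simp

-- the next loop state's sorted positive list, named
theorem sorted_next (arr : List Int) (m : Int) :
    PySem.List.sorted
        ((pvNext arr m).filter (fun n => decide (0 < n)))
        (fun x => x) false
      = ((PySem.List.sorted (arr.filter (fun n => decide (0 < n))) (fun x => x) false).filter
          (fun x => decide (m < x))).map (fun x => x - m) := by
  set pos := arr.filter (fun n => decide (0 < n)) with hpos
  set S := PySem.List.sorted pos (fun x => x) false with hSdef
  have h1 : (pvNext arr m).filter (fun n => decide (0 < n))
      = (pos.filter (fun x => decide (m < x))).map (fun n => n - m) := by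
    rw [pvNext, ← hpos, List.filter_map]
    congr 1
    apply List.filter_congr
    intro x _
    simp only [Function.comp]
    by_cases h : m < x <;> simp [h]
  apply PySem.List.sorted_id_eq_of_perm_of_pairwise
  · -- permutation
    rw [h1]
    exact ((PySem.List.sorted_perm pos (fun x => x) false).filter (fun x => decide (m < x))).map (fun x => x - m)
  · -- sortedness
    have hS : S.Pairwise (· ≤ ·) := by
      simpa using PySem.List.sorted_pairwise pos (fun x => x)
    exact ((hS.filter _).map _ (by intro a b h; omega))

-- main induction: A's loop equals B's scan of the sorted positive list
theorem cut_eq_emit : ∀ (k : Nat) (arr : List Int),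
    (arr.filter (fun n => decide (0 < n))).length ≤ k →
    cut_the_ropes arr
      = pvEmit none (PySem.List.sorted (arr.filter (fun n => decide (0 < n))) (fun x => x) false) := by
  intro k
  induction k with
  | zero =>
      intro arr hlen
      have hnil : arr.filter (fun n => decide (0 < n)) = [] :=
        List.eq_nil_of_length_eq_zero (Nat.le_zero.mp hlen)
      have hany : arr.any (fun n => decide (0 < n)) = false := by
        rw [List.any_eq_false]
        exact fun x hx => List.filter_eq_nil_iff.mp hnil x hx
      rw [cut_the_ropes.eq_def, hnil]
      simp [hany, pvEmit, PySem.List.sorted]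
  | succ k ih =>
      intro arr hlen
      by_cases hany : arr.any (fun n => decide (0 < n)) = true
      · set pos := arr.filter (fun n => decide (0 < n)) with hpos
        have hne : pos ≠ [] := by
          rw [hpos, ne_eq, List.filter_eq_nil_iff]
          simp only [List.any_eq_true] at hany
          obtain ⟨x, hx, hxp⟩ := hany
          intro h; exact absurd (h x hx) (by simpa using hxp)
        rw [cut_the_ropes.eq_def, dif_pos hany, ← hpos]
        split
        next m hm =>
          have hmem : m ∈ pos := PySem.List.min?_mem hm
          have hmin : ∀ y ∈ pos, m ≤ y := fun y hy => PySem.List.min?_isMin hm y hy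
          -- the count equals the number of positive ropes
          have hcount : arr.filter (fun n => decide (0 < n) && decide (m ≤ n)) = pos := by
            have h2 : arr.filter (fun n => decide (0 < n) && decide (m ≤ n))
                = pos.filter (fun n => decide (m ≤ n)) := by
              rw [hpos, List.filter_filter]
              apply List.filter_congr
              intro x _
              by_cases h1 : 0 < x <;> by_cases hq : m ≤ x <;> simp [h1, hq]
            rw [h2, List.filter_eq_self.mpr (fun x hx => by simpa using hmin x hx)]
          rw [hcount]
          -- recursive call via IH
          have hrec := ih (pvNext arr m)
            (by
              have hlt := pv_cut_term arr m (by rw [hpos] at hm; exact hm)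
              rw [← hpos] at hlt
              omega)
          rw [hrec]
          -- rewrite the recursive sorted list and apply the step lemma
          have hnext := sorted_next arr m
          rw [← hpos] at hnext
          rw [hnext]
          set S := PySem.List.sorted pos (fun x => x) false with hSdef
          have hSp : S.Pairwise (· ≤ ·) := by
            simpa using PySem.List.sorted_pairwise pos (fun x => x)
          have hmemS : m ∈ S := by
            rw [hSdef]
            exact (PySem.List.mem_sorted _ _ _ _).mpr hmem
          have hminS : ∀ y ∈ S, m ≤ y := by
            intro y hy
            exact hmin y ((PySem.List.mem_sorted _ _ _ _).mp hy)
          have hlenS : (S.length : Int) = (pos.length : Int) := by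
            rw [hSdef]
            exact_mod_cast congrArg Nat.cast ((PySem.List.sorted_perm pos (fun x => x) false).length_eq)
          rw [pvEmit_step S m hSp hmemS hminS, hlenS]
        next hm =>
          exact absurd ((PySem.List.min?_eq_none_iff pos _).mp hm) hne
      · have hfalse : arr.any (fun n => decide (0 < n)) = false := by
          simpa using hany
        have hnil : arr.filter (fun n => decide (0 < n)) = [] := by
          rw [List.filter_eq_nil_iff]
          simp only [List.any_eq_false] at hfalse
          intro x hx; simpa using hfalse x hx
        rw [cut_the_ropes.eq_def, hnil]
        simp [hfalse, pvEmit, PySem.List.sorted]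

-- ===== VERDICT (by name: the statement is the Claim_ definition above) =====
theorem cut_the_ropes_spec : Claim_equal_cut_the_ropes := by
  intro arr _
  unfold Spec_cut_the_ropes
  rw [alt_eq_emit]
  exact cut_eq_emit (arr.filter (fun n => decide (0 < n))).length arr (le_refl _)
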